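-- pv_equiv track=rewrite | github.com/MANISHBHISE/flentascodinground | Manish.py | canMakeStr2
-- ===== SOURCE A (Python) =====
-- def canMakeStr2(s1, s2):
--     # Create a count array and count
--     # frequencies characters in s1
--     count = {s2[i]: 0 for i in range(len(s2))}
--
--     for i in range(len(s2)):
--         count[s2[i]] += 1
--
--     # Now traverse through str2 to check
--     # if every character has enough counts
--     for i in range(len(s1)):
--         if (count.get(s1[i]) == None or count[s1[i]] == 0):
--             return False
--         count[s1[i]] -= 1
--     return True
-- ===== SOURCE B (Python) =====
-- def canMakeStr2(s1, s2):
--     # Two independent frequency tables; s1 is makeable iff its counts are a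
--     # sub-multiset of s2's counts. No consume-and-decrement, no early return.
--     need = {}
--     for ch in s1:
--         need[ch] = need.get(ch, 0) + 1
--     have = {}
--     for ch in s2:
--         have[ch] = have.get(ch, 0) + 1
--     return all(v <= have.get(k, 0) for k, v in need.items())
-- ===== Notes on version B (the rewrite author's own statement) =====
-- stated objective: idiomatic
-- what changed: Replaces A's consume-and-decrement dict loop with early return by two independent frequency tables and one sub-multiset comparison (Counter(s1) <= Counter(s2) written with plain dicts).
import Mathlib
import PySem

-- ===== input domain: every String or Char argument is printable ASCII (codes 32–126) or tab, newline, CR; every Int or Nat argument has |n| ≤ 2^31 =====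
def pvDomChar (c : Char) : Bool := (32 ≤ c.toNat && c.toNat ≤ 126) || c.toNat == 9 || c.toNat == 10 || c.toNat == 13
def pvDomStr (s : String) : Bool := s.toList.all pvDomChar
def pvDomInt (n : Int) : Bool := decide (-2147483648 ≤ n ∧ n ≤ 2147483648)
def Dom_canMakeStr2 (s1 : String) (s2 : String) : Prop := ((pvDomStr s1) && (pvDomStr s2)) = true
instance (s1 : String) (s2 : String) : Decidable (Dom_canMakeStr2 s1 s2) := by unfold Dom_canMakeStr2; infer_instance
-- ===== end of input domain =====

-- B replaces A's consume-and-decrement dict loop (with early return) by two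
-- independent frequency tables and one sub-multiset comparison (idiomatic; not faster).

-- ===== PORT A =====
-- A's 'for i in range(len(s1))' loop with early 'return False', reading s1[i]:
-- ported as structural recursion over s1's characters (same values in the same order).
def pvLoopA (count : PySem.Dict Char Int) : List Char → Bool
  | [] => true
  | c :: rest =>
    match count.get? c with
    | none => false                                   -- count.get(s1[i]) == None
    | some v => if v == 0 then false                  -- or count[s1[i]] == 0
                else pvLoopA (count.insert c (v - 1)) rest   -- count[s1[i]] -= 1

def canMakeStr2 (s1 : String) (s2 : String) : Bool :=
  -- count = {s2[i]: 0 for i in range(len(s2))}  (index loop over s2 as a fold over its chars)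
  let count0 : PySem.Dict Char Int := s2.toList.foldl (fun d c => d.insert c 0) PySem.Dict.empty
  -- for i in range(len(s2)): count[s2[i]] += 1
  let count : PySem.Dict Char Int := s2.toList.foldl (fun d c => d.insert c (d.getD c 0 + 1)) count0
  pvLoopA count s1.toList

-- ===== PORT B =====
def canMakeStr2_alt (s1 : String) (s2 : String) : Bool :=
  let need : PySem.Dict Char Int := s1.toList.foldl (fun d c => d.insert c (d.getD c 0 + 1)) PySem.Dict.empty
  let hav  : PySem.Dict Char Int := s2.toList.foldl (fun d c => d.insert c (d.getD c 0 + 1)) PySem.Dict.empty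
  need.items.all (fun kv => decide (kv.2 ≤ hav.getD kv.1 0))

-- ===== PRECONDITION & SPEC =====
def Spec_canMakeStr2 (s1 : String) (s2 : String) (out : Bool) : Prop := out = canMakeStr2_alt s1 s2
instance (s1 : String) (s2 : String) (out : Bool) : Decidable (Spec_canMakeStr2 s1 s2 out) := by unfold Spec_canMakeStr2; infer_instance

-- ===== CLAIM (what is proved, stated in full; the proofs are below) =====
def Claim_equal_canMakeStr2 : Prop := ∀ (s1 : String) (s2 : String), Dom_canMakeStr2 s1 s2 → Spec_canMakeStr2 s1 s2 (canMakeStr2 s1 s2)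

-- ===== LEMMAS AND PROOFS =====

-- A's checking loop succeeds iff every character of l occurs in l at most its
-- current credit in the dict (dict values assumed nonnegative, as counts are).
lemma pvLoopA_iff (l : List Char) (d : PySem.Dict Char Int)
    (hd : ∀ a : Char, 0 ≤ d.getD a 0) :
    pvLoopA d l = true ↔ ∀ c ∈ l, (l.count c : Int) ≤ d.getD c 0 := by
  induction l generalizing d with
  | nil => simp [pvLoopA]
  | cons c t ih =>
    unfold pvLoopA
    cases hget : d.get? c with
    | none =>
      have h0 : d.getD c 0 = 0 := PySem.Dict.getD_of_get?_eq_none d 0 hget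
      simp only [Bool.false_eq_true, false_iff]
      intro h
      have := h c (by simp)
      rw [h0] at this
      simp [List.count_cons_self] at this
      omega
    | some v =>
      have hv : d.getD c 0 = v := PySem.Dict.getD_of_get?_eq_some d 0 hget
      by_cases hz : v = 0
      · subst hz
        simp only [beq_self_eq_true, if_true, Bool.false_eq_true, false_iff]
        intro h
        have := h c (by simp)
        rw [hv] at this
        simp [List.count_cons_self] at this
        omega
      · have hvpos : 1 ≤ v := by have := hd c; rw [hv] at this; omega
        show (if (v == 0) = true then false else pvLoopA (d.insert c (v - 1)) t) = true ↔ _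
        rw [if_neg (by simpa using hz)]
        have hd' : ∀ a : Char, 0 ≤ (d.insert c (v - 1)).getD a 0 := by
          intro a
          rw [PySem.Dict.getD_insert]
          split_ifs with h
          · omega
          · exact hd a
        rw [ih _ hd']
        constructor
        · intro hP a ha
          rcases List.mem_cons.mp ha with rfl | hat
          · by_cases hct : a ∈ t
            · have := hP a hct
              rw [PySem.Dict.getD_insert, if_pos rfl] at this
              rw [hv]
              simp only [List.count_cons_self]
              push_cast
              omega
            · rw [hv]
              have : t.count a = 0 := List.count_eq_zero.mpr hct
              simp [List.count_cons_self, this]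
              omega
          · by_cases hac : a = c
            · subst hac
              have := hP a hat
              rw [PySem.Dict.getD_insert, if_pos rfl] at this
              rw [hv]
              simp only [List.count_cons_self]
              push_cast
              omega
            · have := hP a hat
              rw [PySem.Dict.getD_insert, if_neg hac] at this
              simpa [List.count_cons, Ne.symm hac] using this
        · intro hQ a hat
          rw [PySem.Dict.getD_insert]
          by_cases hac : a = c
          · subst hac
            have := hQ a (List.mem_cons_of_mem _ hat)
            rw [hv, List.count_cons_self] at this
            rw [if_pos rfl]
            push_cast at this
            omega
          · rw [if_neg hac]
            have := hQ a (List.mem_cons_of_mem _ hat)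
            simpa [List.count_cons, Ne.symm hac] using this

-- the zero-initialising comprehension yields a dict with every lookup-with-default 0
lemma getD_foldl_insert_zero (l : List Char) (d : PySem.Dict Char Int)
    (hd : ∀ a : Char, d.getD a 0 = 0) (a : Char) :
    (l.foldl (fun d c => d.insert c (0 : Int)) d).getD a 0 = 0 := by
  induction l generalizing d with
  | nil => exact hd a
  | cons c t ih =>
    simp only [List.foldl_cons]
    refine ih _ ?_
    intro b
    rw [PySem.Dict.getD_insert]
    split_ifs with h
    · rfl
    · exact hd b

-- A's counting dict looks up to the plain character count of s2
lemma getD_countA (l : List Char) (a : Char) :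
    ((l.foldl (fun d c => d.insert c (d.getD c 0 + 1))
        (l.foldl (fun d c => d.insert c (0 : Int)) PySem.Dict.empty)).getD a 0)
      = (l.count a : Int) := by
  rw [PySem.Dict.getD_foldl_insert_add_one]
  rw [getD_foldl_insert_zero l PySem.Dict.empty (fun b => by simp [PySem.Dict.getD_empty]) a]
  omega

lemma canMakeStr2_iff (s1 s2 : String) :
    canMakeStr2 s1 s2 = true ↔
      ∀ c ∈ s1.toList, (s1.toList.count c : Int) ≤ (s2.toList.count c : Int) := by
  unfold canMakeStr2
  rw [pvLoopA_iff _ _ (fun a => by rw [getD_countA]; positivity)]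
  constructor <;> intro h c hc <;> have := h c hc
  · rwa [getD_countA] at this
  · rwa [getD_countA]

lemma canMakeStr2_alt_iff (s1 s2 : String) :
    canMakeStr2_alt s1 s2 = true ↔
      ∀ c ∈ s1.toList, (s1.toList.count c : Int) ≤ (s2.toList.count c : Int) := by
  unfold canMakeStr2_alt
  rw [PySem.Dict.foldl_insert_getD_add_one_eq_counter]
  simp only [List.all_eq_true, PySem.Dict.items_counter, List.mem_map]
  constructor
  · intro h c hc
    have := h (c, (s1.toList.count c : Int))
      ⟨c, (PySem.Set.mem_ofList _ _).mpr hc, rfl⟩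
    rw [PySem.Dict.getD_foldl_insert_add_one, PySem.Dict.getD_empty] at this
    simp only [decide_eq_true_eq] at this
    omega
  · intro h kv hkv
    obtain ⟨c, hc, rfl⟩ := hkv
    rw [PySem.Dict.getD_foldl_insert_add_one, PySem.Dict.getD_empty]
    simp only [decide_eq_true_eq]
    have := h c (((PySem.Set.mem_ofList _ _).mp hc))
    omega

-- ===== VERDICT (by name: the statement is the Claim_ definition above) =====
theorem canMakeStr2_spec : Claim_equal_canMakeStr2 := by
  intro s1 s2 _
  unfold Spec_canMakeStr2
  rw [Bool.eq_iff_iff, canMakeStr2_iff, canMakeStr2_alt_iff]
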